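-- pv_equiv track=rewrite | github.com/umass-ai-safety/colosseum | network_influence/plots/plot_sweep.py | _ordered_topologies
-- ===== SOURCE A (Python) =====
-- from typing import Any, Dict, List, Optional, Tuple
--
-- def _ordered_topologies(topologies: List[Any]) -> List[Any]:
--     preferred = [
--         "path",
--         "star",
--         "complete",
--         "watts_strogatz",
--         "barabasi_albert",
--         "erdos_renyi",
--     ]
--     preferred_idx = {name: i for i, name in enumerate(preferred)}
--
--     def _key(t: Any) -> Tuple[int, str]:
--         s = str(t or "")
--         idx = preferred_idx.get(s, preferred_idx.get(s.lower(), 10_000))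
--         return (idx, s)
--
--     return sorted(topologies, key=_key)
-- ===== SOURCE B (Python) =====
-- from typing import Any, List
--
-- def _ordered_topologies(topologies: List[Any]) -> List[Any]:
--     preferred = [
--         "path",
--         "star",
--         "complete",
--         "watts_strogatz",
--         "barabasi_albert",
--         "erdos_renyi",
--     ]
--     pos = {name: i for i, name in enumerate(preferred)}
--     # one bucket per preferred name, plus a trailing bucket for everything else
--     buckets = [[] for _ in range(len(preferred) + 1)]
--     for t in topologies:
--         s = str(t or "")
--         buckets[pos.get(s, pos.get(s.lower(), len(preferred)))].append((s, t))
--     out = []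
--     for b in buckets:
--         b.sort(key=lambda p: p[0])
--         out.extend(t for _, t in b)
--     return out
-- ===== Notes on version B (the rewrite author's own statement) =====
-- stated objective: alternative
-- what changed: Replaces the single comparison sort keyed by a (preference-index, name) tuple with a one-pass partition into seven buckets (one per preferred name plus an 'other' bucket), a per-bucket sort by name only, and concatenation of the buckets in preference order.
import Mathlib
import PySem

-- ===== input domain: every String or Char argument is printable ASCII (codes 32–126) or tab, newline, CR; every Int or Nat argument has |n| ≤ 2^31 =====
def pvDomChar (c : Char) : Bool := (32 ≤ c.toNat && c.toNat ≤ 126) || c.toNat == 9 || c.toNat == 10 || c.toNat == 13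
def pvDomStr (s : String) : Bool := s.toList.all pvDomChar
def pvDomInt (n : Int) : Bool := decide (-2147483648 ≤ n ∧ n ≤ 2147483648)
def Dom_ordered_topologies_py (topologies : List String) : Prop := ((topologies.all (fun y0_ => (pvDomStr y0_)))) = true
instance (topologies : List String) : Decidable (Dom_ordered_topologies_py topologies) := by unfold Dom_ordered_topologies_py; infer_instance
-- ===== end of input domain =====

-- B replaces A's single comparison sort keyed by (preference-index, name) with a one-pass
-- partition into seven buckets (one per preferred name + one for everything else), a per-bucket
-- sort by name, and concatenation in preference order (objective: alternative, same cost).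

-- ===== PORT A =====
-- preferred = ["path", …]
def otpA_preferred : List String :=
  ["path", "star", "complete", "watts_strogatz", "barabasi_albert", "erdos_renyi"]
-- preferred_idx = {name: i for i, name in enumerate(preferred)}
def otpA_preferred_idx : PySem.Dict String Int :=
  PySem.Dict.ofList ((PySem.List.enumerate otpA_preferred).map (fun p => (p.2, p.1)))
-- _key(t) returns the tuple (idx, s); ported as the two components of the sorted2 tuple key.
-- 's = str(t or "")' for a string t is exactly: "" if t = "" else t.
def otpA_key1 (t : String) : Int :=
  let s := if t = "" then "" else t
  otpA_preferred_idx.getD s (otpA_preferred_idx.getD (PySem.Str.lower s) 10000)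
def otpA_key2 (t : String) : String :=
  if t = "" then "" else t
-- return sorted(topologies, key=_key)
def ordered_topologies_py (topologies : List String) : List String :=
  PySem.List.sorted2 topologies otpA_key1 otpA_key2 false

-- ===== PORT B =====
def otpB_preferred : List String :=
  ["path", "star", "complete", "watts_strogatz", "barabasi_albert", "erdos_renyi"]
-- pos = {name: i for i, name in enumerate(preferred)}
def otpB_pos : PySem.Dict String Int :=
  PySem.Dict.ofList ((PySem.List.enumerate otpB_preferred).map (fun p => (p.2, p.1)))
-- bucket index pos.get(s, pos.get(s.lower(), len(preferred))); always in 0..6, so .toNat is exact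
def otpB_bucketIdx (s : String) : Int :=
  otpB_pos.getD s (otpB_pos.getD (PySem.Str.lower s) 6)
-- loop body: buckets[i].append((s, t))
def otpB_step (bs : List (List (String × String))) (t : String) : List (List (String × String)) :=
  let s := if t = "" then "" else t
  bs.set (otpB_bucketIdx s).toNat ((bs.getD (otpB_bucketIdx s).toNat []) ++ [(s, t)])
-- buckets = [[] for _ in range(7)]; fill; then for each bucket: sort by s, emit the t's
def ordered_topologies_py_alt (topologies : List String) : List String :=
  let buckets := topologies.foldl otpB_step (List.replicate 7 [])
  (buckets.map (fun b => (PySem.List.sorted b (fun p => p.1) false).map (fun p => p.2))).flatten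

-- ===== PRECONDITION & SPEC =====
def Spec_ordered_topologies_py (topologies : List String) (out : List String) : Prop := out = ordered_topologies_py_alt topologies
instance (topologies : List String) (out : List String) : Decidable (Spec_ordered_topologies_py topologies out) := by unfold Spec_ordered_topologies_py; infer_instance

-- ===== CLAIM (what is proved, stated in full; the proofs are below) =====
def Claim_equal_ordered_topologies_py : Prop := ∀ (topologies : List String), Dom_ordered_topologies_py topologies → Spec_ordered_topologies_py topologies (ordered_topologies_py topologies)

-- ===== LEMMAS AND PROOFS =====

-- 'str(t or "")' is just t for a string t
lemma otp_ite_empty (t : String) : (if t = "" then "" else t) = t := by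
  split_ifs with h <;> simp [h]

lemma otpA_key2_eq (t : String) : otpA_key2 t = t := by
  simp [otpA_key2, otp_ite_empty]

-- the two dicts are the same literal
lemma otpB_pos_eq : otpB_pos = otpA_preferred_idx := rfl

-- lookup in the literal 6-entry dict, as an if-chain
lemma otp_lookup6 (s : String) (dflt : Int) :
    otpA_preferred_idx.getD s dflt =
      if s = "path" then 0 else if s = "star" then 1 else if s = "complete" then 2
      else if s = "watts_strogatz" then 3 else if s = "barabasi_albert" then 4
      else if s = "erdos_renyi" then 5 else dflt := by
  have h : otpA_preferred_idx.items =
      [("path", (0:Int)), ("star", 1), ("complete", 2), ("watts_strogatz", 3),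
       ("barabasi_albert", 4), ("erdos_renyi", 5)] := by rfl
  simp only [PySem.Dict.getD, PySem.Dict.get?, h, List.find?]
  clear h
  split_ifs with h1 h2 h3 h4 h5 h6
  · subst h1; rfl
  · subst h2; rfl
  · subst h3; rfl
  · subst h4; rfl
  · subst h5; rfl
  · subst h6; rfl
  · rw [show ("path" == s) = false from beq_eq_false_iff_ne.mpr (fun he => h1 he.symm),
        show ("star" == s) = false from beq_eq_false_iff_ne.mpr (fun he => h2 he.symm),
        show ("complete" == s) = false from beq_eq_false_iff_ne.mpr (fun he => h3 he.symm),
        show ("watts_strogatz" == s) = false from beq_eq_false_iff_ne.mpr (fun he => h4 he.symm),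
        show ("barabasi_albert" == s) = false from beq_eq_false_iff_ne.mpr (fun he => h5 he.symm),
        show ("erdos_renyi" == s) = false from beq_eq_false_iff_ne.mpr (fun he => h6 he.symm)]
    rfl

-- A's index is B's bucket index, re-coded through 10000; and the bucket index is in 0..6
lemma otp_key1_bidx (t : String) :
    (0 ≤ otpB_bucketIdx t ∧ otpB_bucketIdx t < 7) ∧
    otpA_key1 t = (if otpB_bucketIdx t = 6 then 10000 else otpB_bucketIdx t) := by
  unfold otpA_key1 otpB_bucketIdx
  rw [otpB_pos_eq, otp_ite_empty]
  simp only [otp_lookup6]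
  by_cases h1 : t = "path"
  · simp [h1]
  by_cases h2 : t = "star"
  · simp [h2]
  by_cases h3 : t = "complete"
  · simp [h3]
  by_cases h4 : t = "watts_strogatz"
  · simp [h4]
  by_cases h5 : t = "barabasi_albert"
  · simp [h5]
  by_cases h6 : t = "erdos_renyi"
  · simp [h6]
  by_cases g1 : PySem.Str.lower t = "path"
  · simp [h1, h2, h3, h4, h5, h6, g1]
  by_cases g2 : PySem.Str.lower t = "star"
  · simp [h1, h2, h3, h4, h5, h6, g2]
  by_cases g3 : PySem.Str.lower t = "complete"
  · simp [h1, h2, h3, h4, h5, h6, g3]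
  by_cases g4 : PySem.Str.lower t = "watts_strogatz"
  · simp [h1, h2, h3, h4, h5, h6, g4]
  by_cases g5 : PySem.Str.lower t = "barabasi_albert"
  · simp [h1, h2, h3, h4, h5, h6, g5]
  by_cases g6 : PySem.Str.lower t = "erdos_renyi"
  · simp [h1, h2, h3, h4, h5, h6, g6]
  simp [h1, h2, h3, h4, h5, h6, g1, g2, g3, g4, g5, g6]

lemma otp_key1_eq (t : String) :
    otpA_key1 t = if otpB_bucketIdx t = 6 then 10000 else otpB_bucketIdx t :=
  (otp_key1_bidx t).2

lemma otp_bidx_bounds (s : String) : 0 ≤ otpB_bucketIdx s ∧ otpB_bucketIdx s < 7 :=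
  (otp_key1_bidx s).1

-- the lexicographic sort key of A, as one linearly ordered value
def otpKey (t : String) : Lex (Int × String) := toLex (otpA_key1 t, otpA_key2 t)

lemma otpKey_inj : Function.Injective otpKey := by
  intro a b h
  have h2 := congrArg (fun x => (ofLex x).2) h
  simpa [otpKey, otpA_key2_eq] using h2

lemma otpKey_lt_of_bidx_lt {a b : String} (h : otpB_bucketIdx a < otpB_bucketIdx b) :
    otpKey a < otpKey b := by
  have ha := otp_bidx_bounds a
  have hb := otp_bidx_bounds b
  have h1 := otp_key1_eq a
  have h2 := otp_key1_eq b
  refine Prod.Lex.lt_iff.mpr (Or.inl ?_)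
  simp only [otpKey, ofLex_toLex]
  split_ifs at h1 h2 <;> omega

lemma otpKey_le_of_bidx_eq {a b : String} (hidx : otpB_bucketIdx a = otpB_bucketIdx b)
    (hle : a ≤ b) : otpKey a ≤ otpKey b := by
  rcases eq_or_lt_of_le hle with rfl | hlt
  · exact le_refl _
  · refine Prod.Lex.le_iff.mpr (Or.inr ?_)
    simp [otpKey, otp_key1_eq, otpA_key2_eq, hidx, le_of_lt hlt]

-- the two 'before' comparators agree
lemma otp_before_eq :
    (fun a b => decide (otpA_key1 a < otpA_key1 b) ||
      (!decide (otpA_key1 b < otpA_key1 a) && decide (otpA_key2 a < otpA_key2 b)))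
    = (fun a b : String => decide (otpKey a < otpKey b)) := by
  funext a b
  by_cases h1 : otpA_key1 a < otpA_key1 b <;> by_cases h2 : otpA_key1 b < otpA_key1 a <;>
    by_cases h3 : otpA_key2 a < otpA_key2 b <;>
    simp [h1, h2, h3, otpKey, Prod.Lex.lt_iff] <;> omega

lemma otp_A_eq_sorted (xs : List String) :
    ordered_topologies_py xs = PySem.List.sorted xs otpKey false := by
  exact congrArg
    (fun f => List.foldl (fun acc x => PySem.List.insertBy f x acc) [] xs) otp_before_eq

-- appending into one bucket permutes the flattened contents by one element
lemma otp_flatten_set_perm {α : Type} (bs : List (List α)) (k : Nat) (hk : k < bs.length)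
    (p : α) : ((bs.set k (bs.getD k [] ++ [p])).flatten).Perm (bs.flatten ++ [p]) := by
  induction bs generalizing k with
  | nil => simp at hk
  | cons b rest ih =>
    cases k with
    | zero =>
      simp only [List.set_cons_zero, List.getD_cons_zero, List.flatten_cons, List.append_assoc]
      exact List.Perm.append_left b (List.perm_append_comm)
    | succ k =>
      simp only [List.set_cons_succ, List.getD_cons_succ, List.flatten_cons, List.append_assoc]
      exact List.Perm.append_left b ((ih k (by simpa using hk)).trans (by simp))

-- the bucket-filling loop: length stays 7, every bucket holds its own (s,t)-pairs,
-- and the flattened contents are a permutation of what went in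
lemma otp_fold_inv (xs : List String) (bs : List (List (String × String)))
    (hlen : bs.length = 7)
    (hgood : ∀ i b, bs[i]? = some b → ∀ p ∈ b, p.1 = p.2 ∧ (otpB_bucketIdx p.1).toNat = i) :
    (xs.foldl otpB_step bs).length = 7 ∧
    (∀ i b, (xs.foldl otpB_step bs)[i]? = some b → ∀ p ∈ b,
      p.1 = p.2 ∧ (otpB_bucketIdx p.1).toNat = i) ∧
    ((xs.foldl otpB_step bs).flatten).Perm (bs.flatten ++ xs.map (fun t => (t, t))) := by
  induction xs generalizing bs with
  | nil => exact ⟨hlen, hgood, by simp⟩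
  | cons t ts ih =>
    have hstep : otpB_step bs t
        = bs.set (otpB_bucketIdx t).toNat ((bs.getD (otpB_bucketIdx t).toNat []) ++ [(t, t)]) := by
      simp [otpB_step, otp_ite_empty]
    have hk : (otpB_bucketIdx t).toNat < bs.length := by
      have := otp_bidx_bounds t; omega
    have hlen2 : (otpB_step bs t).length = 7 := by rw [hstep]; simpa using hlen
    have hgood2 : ∀ i b, (otpB_step bs t)[i]? = some b → ∀ p ∈ b,
        p.1 = p.2 ∧ (otpB_bucketIdx p.1).toNat = i := by
      intro i b hb p hp
      rw [hstep, List.getElem?_set] at hb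
      by_cases hik : (otpB_bucketIdx t).toNat = i
      · rw [if_pos hik, if_pos hk] at hb
        cases hb
        rcases List.mem_append.mp hp with hmem | hmem
        · have hsome : bs[(otpB_bucketIdx t).toNat]? = some bs[(otpB_bucketIdx t).toNat] :=
            List.getElem?_eq_getElem hk
          have := hgood _ _ hsome p
            (by rwa [List.getD_eq_getElem?_getD, hsome] at hmem)
          rwa [hik] at this
        · simp only [List.mem_singleton] at hmem
          subst hmem
          exact ⟨rfl, hik⟩
      · rw [if_neg hik] at hb
        exact hgood i b hb p hp
    obtain ⟨l3, g3, p3⟩ := ih (otpB_step bs t) hlen2 hgood2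
    refine ⟨by simpa using l3, by simpa using g3, ?_⟩
    simp only [List.foldl_cons]
    refine p3.trans ?_
    have hset : ((otpB_step bs t).flatten).Perm (bs.flatten ++ [(t, t)]) := by
      rw [hstep]; exact otp_flatten_set_perm bs _ hk _
    refine (hset.append_right _).trans ?_
    simp [List.append_assoc]

lemma otp_flatten_map_perm {α β : Type} (l : List (List α)) (F G : List α → List β)
    (h : ∀ b, (F b).Perm (G b)) : ((l.map F).flatten).Perm ((l.map G).flatten) := by
  induction l with
  | nil => rfl
  | cons b r ih =>
    simp only [List.map_cons, List.flatten_cons]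
    exact (h b).append ih

lemma otp_main (xs : List String) :
    ordered_topologies_py xs = ordered_topologies_py_alt xs := by
  obtain ⟨hlen, hgood, hperm⟩ := otp_fold_inv xs (List.replicate 7 []) (by simp)
    (by intro i b hb p hp
        rw [List.getElem?_replicate] at hb
        split_ifs at hb
        cases hb
        simp at hp)
  simp only [ordered_topologies_py_alt]
  rw [otp_A_eq_sorted]
  generalize hbs : xs.foldl otpB_step (List.replicate 7 []) = bs at hlen hgood hperm ⊢
  simp only [List.flatten_replicate_nil, List.nil_append] at hperm
  -- membership fact: everything in bucket i carries bucket index i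
  have hmemF : ∀ i (hi : i < bs.length), ∀ x ∈
      (PySem.List.sorted bs[i] (fun p => p.1) false).map (fun p => p.2),
      (otpB_bucketIdx x).toNat = i := by
    intro i hi x hx
    rcases List.mem_map.mp hx with ⟨p, hp, rfl⟩
    have hp' : p ∈ bs[i] := (PySem.List.mem_sorted _ _ _ _).mp hp
    obtain ⟨he, hb⟩ := hgood i bs[i] (List.getElem?_eq_getElem hi) p hp'
    rwa [← he]
  -- B's output is a permutation of xs
  have hBperm : ((bs.map (fun b =>
      (PySem.List.sorted b (fun p => p.1) false).map (fun p => p.2))).flatten).Perm xs := by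
    have h1 := otp_flatten_map_perm bs
      (fun b => (PySem.List.sorted b (fun p => p.1) false).map (fun p => p.2))
      (fun b => b.map (fun p => p.2))
      (fun b => (PySem.List.sorted_perm b _ _).map _)
    refine h1.trans ?_
    rw [← List.map_flatten]
    have h2 := hperm.map (fun p : String × String => p.2)
    simpa [Function.comp_def] using h2
  -- B's output is pairwise nondecreasing under A's sort key
  have hBpair : List.Pairwise (fun a b => otpKey a ≤ otpKey b)
      ((bs.map (fun b =>
        (PySem.List.sorted b (fun p => p.1) false).map (fun p => p.2))).flatten) := by
    refine List.pairwise_flatten.mpr ⟨?_, ?_⟩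
    · intro l hl
      rcases List.mem_map.mp hl with ⟨b, hb, rfl⟩
      rcases List.mem_iff_getElem.mp hb with ⟨i, hi, rfl⟩
      rw [List.pairwise_map]
      have hsp := PySem.List.sorted_pairwise bs[i] (fun p : String × String => p.1)
      refine hsp.imp_of_mem ?_
      intro p q hp hq hle
      obtain ⟨hpe, hpi⟩ := hgood i bs[i] (List.getElem?_eq_getElem hi) p
        ((PySem.List.mem_sorted _ _ _ _).mp hp)
      obtain ⟨hqe, hqi⟩ := hgood i bs[i] (List.getElem?_eq_getElem hi) q
        ((PySem.List.mem_sorted _ _ _ _).mp hq)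
      rw [← hpe, ← hqe]
      refine otpKey_le_of_bidx_eq ?_ hle
      have hb1 := otp_bidx_bounds p.1
      have hb2 := otp_bidx_bounds q.1
      omega
    · rw [List.pairwise_iff_getElem]
      intro i j hi hj hij x hx y hy
      rw [List.getElem_map] at hx hy
      have hxi := hmemF i (by simpa using hi) x hx
      have hyj := hmemF j (by simpa using hj) y hy
      have hax := otp_bidx_bounds x
      have hay := otp_bidx_bounds y
      exact le_of_lt (otpKey_lt_of_bidx_lt (by omega))
  exact PySem.List.eq_of_perm_of_pairwise_le_of_injective otpKey otpKey_inj
    ((PySem.List.sorted_perm xs otpKey false).trans hBperm.symm)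
    (PySem.List.sorted_pairwise xs otpKey) hBpair

-- ===== VERDICT (by name: the statement is the Claim_ definition above) =====
theorem ordered_topologies_py_spec : Claim_equal_ordered_topologies_py := by
  intro topologies _
  unfold Spec_ordered_topologies_py
  exact otp_main topologies
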